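-- pv_equiv track=rewrite | github.com/hrushikeshrv/aoc | 2020/day14.py | binary_enum
-- ===== SOURCE A (Python) =====
-- def binary_enum(iterator, key = 'X'):
--     diff_list = []
--     diff_list.append(''.join(iterator).replace(key, '0'))
--     for l in reversed(range(len(iterator))):
--         if iterator[l] == key:
--             curr_len = len(diff_list)
--             for diff in range(curr_len):
--                 _ = [x for x in diff_list[diff]]
--                 _[l] = '1'
--                 diff_list.append(''.join(_))
--     return diff_list
-- ===== SOURCE B (Python) =====
-- def binary_enum(iterator, key = 'X'):
--     base = list(''.join(iterator).replace(key, '0'))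
--     positions = [i for i in range(len(iterator)) if iterator[i] == key]
--     n = len(positions)
--     out = []
--     for v in range(2 ** n):
--         t = base.copy()
--         for j in range(n):
--             if v // 2 ** (n - 1 - j) % 2 == 1:
--                 t[positions[j]] = '1'
--         out.append(''.join(t))
--     return out
-- ===== Notes on version B (the rewrite author's own statement) =====
-- stated objective: alternative
-- what changed: B replaces A's list-doubling accumulation (appending a '1'-variant of every existing string per X position, right to left) by computing the X-position list once and directly generating the 2^k bit patterns with integer arithmetic, writing each pattern's bits into a copy of the base string.
import Mathlib
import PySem

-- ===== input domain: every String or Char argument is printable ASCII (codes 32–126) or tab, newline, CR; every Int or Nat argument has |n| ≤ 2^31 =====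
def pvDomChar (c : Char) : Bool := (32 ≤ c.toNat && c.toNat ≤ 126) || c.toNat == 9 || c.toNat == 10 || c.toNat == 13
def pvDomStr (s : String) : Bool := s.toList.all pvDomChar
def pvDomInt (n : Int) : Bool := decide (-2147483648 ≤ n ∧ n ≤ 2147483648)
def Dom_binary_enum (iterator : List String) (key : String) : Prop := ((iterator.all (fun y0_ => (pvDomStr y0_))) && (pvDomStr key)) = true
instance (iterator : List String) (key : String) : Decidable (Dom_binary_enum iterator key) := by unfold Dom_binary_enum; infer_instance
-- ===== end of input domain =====

-- B replaces A's list-doubling accumulation by direct enumeration of the 2^k bit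
-- patterns over the X-positions (same values, same order); objective: alternative.

-- ===== PORT A =====
-- '_ = [x for x in s]; _[l] = '1'; ''.join(_)'  (under Pre_, l is in range, so List.set is exact)
def pvSet1 (s : String) (l : Nat) : String := String.ofList (s.toList.set l '1')

def binary_enum (iterator : List String) (key : String) : List String :=
  -- diff_list = ['' .join(iterator).replace(key, '0')]
  let diff0 : List String := [PySem.Str.replace (PySem.Str.join "" iterator) key "0"]
  -- for l in reversed(range(len(iterator))): if iterator[l] == key: for diff in range(curr_len): append
  ((PySem.List.pyRange 0 iterator.length 1).reverse).foldl (fun diff_list l =>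
    if PySem.List.pyGet? iterator l == some key then
      (List.range diff_list.length).foldl
        (fun acc diff => acc ++ [pvSet1 (acc.getD diff "") l.toNat]) diff_list
    else diff_list) diff0

-- ===== PORT B =====
-- 'for j in range(n): if v // 2**(n-1-j) % 2 == 1: t[positions[j]] = '1''  (walks positions with j as the counter)
def pvWriteLoop (t : List Char) (ps : List Int) (v n j : Nat) : List Char :=
  match ps with
  | [] => t
  | p :: rest =>
      pvWriteLoop (if v / 2 ^ (n - 1 - j) % 2 = 1 then t.set p.toNat '1' else t) rest v n (j + 1)

def binary_enum_alt (iterator : List String) (key : String) : List String :=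
  let base := (PySem.Str.replace (PySem.Str.join "" iterator) key "0").toList
  let positions := (PySem.List.pyRange 0 iterator.length 1).filter
      (fun i => PySem.List.pyGet? iterator i == some key)
  let n := positions.length
  (List.range (2 ^ n)).map (fun v => String.ofList (pvWriteLoop base positions v n 0))

-- ===== PRECONDITION & SPEC =====
-- Pre_ excludes exactly the inputs on which Python A raises IndexError: some X-position
-- (index l with iterator[l] == key) is not a valid index into the joined-and-replaced
-- base string (possible only with multi-character or empty list elements/keys).
def Pre_binary_enum (iterator : List String) (key : String) : Prop :=
  ∀ l ∈ List.range iterator.length, iterator.getD l "" = key →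
    l < (PySem.Str.replace (PySem.Str.join "" iterator) key "0").toList.length
instance (iterator : List String) (key : String) : Decidable (Pre_binary_enum iterator key) := by
  unfold Pre_binary_enum; infer_instance

def pvWitness_binary_enum : List String × String := (["X", "a", "X"], "X")

def Spec_binary_enum (iterator : List String) (key : String) (out : List String) : Prop := out = binary_enum_alt iterator key
instance (iterator : List String) (key : String) (out : List String) : Decidable (Spec_binary_enum iterator key out) := by unfold Spec_binary_enum; infer_instance

-- ===== CLAIM (what is proved, stated in full; the proofs are below) =====
def Claim_equal_binary_enum : Prop := ∀ (iterator : List String) (key : String), Dom_binary_enum iterator key → Pre_binary_enum iterator key → Spec_binary_enum iterator key (binary_enum iterator key)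

-- ===== LEMMAS AND PROOFS =====

-- A's inner loop appends, for each index below the starting length, the '1'-write of that entry.
theorem pv_inner_general (l : Nat) (xs : List String) :
    ∀ (r : List Nat) (ext : List String), (∀ d ∈ r, d < xs.length) →
      r.foldl (fun acc d => acc ++ [pvSet1 (acc.getD d "") l]) (xs ++ ext)
        = xs ++ ext ++ r.map (fun d => pvSet1 (xs.getD d "") l) := by
  intro r
  induction r with
  | nil => intro ext _; simp
  | cons d r' ih =>
      intro ext h
      have hd : d < xs.length := h d (by simp)
      have hrest : ∀ x ∈ r', x < xs.length := fun x hx => h x (by simp [hx])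
      simp only [List.foldl_cons, List.map_cons]
      rw [List.getD_append _ _ _ _ hd, List.append_assoc xs ext, ih (ext ++ [pvSet1 (xs.getD d "") l]) hrest]
      simp

theorem pv_inner (l : Nat) (xs : List String) :
    (List.range xs.length).foldl (fun acc d => acc ++ [pvSet1 (acc.getD d "") l]) xs
      = xs ++ xs.map (fun s => pvSet1 s l) := by
  have h := pv_inner_general l xs (List.range xs.length) []
    (by intro d hd; simpa using hd)
  simp only [List.append_nil] at h
  rw [h]
  congr 1
  apply List.ext_getElem
  · simp
  · intro i h1 h2
    simp at h1 h2 ⊢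
    simp [List.getElem?_eq_getElem h2]

theorem pv_writeLoop_shift (ps : List Int) :
    ∀ (t : List Char) (v n j : Nat),
      pvWriteLoop t ps v (n + 1) (j + 1) = pvWriteLoop t ps v n j := by
  induction ps with
  | nil => intro t v n j; rfl
  | cons p rest ih =>
      intro t v n j
      have : n + 1 - 1 - (j + 1) = n - 1 - j := by omega
      simp only [pvWriteLoop, this, ih]

theorem pv_writeLoop_bitdrop (ps : List Int) :
    ∀ (t : List Char) (w n j : Nat), 0 < n →
      pvWriteLoop t ps (2 ^ n + w) n j = pvWriteLoop t ps w n j := by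
  induction ps with
  | nil => intro t w n j _; rfl
  | cons p rest ih =>
      intro t w n j hn
      have hdiv : (2 ^ n + w) / 2 ^ (n - 1 - j) % 2 = w / 2 ^ (n - 1 - j) % 2 := by
        have hn1 : n = (n - (n - 1 - j) - 1) + 1 + (n - 1 - j) := by omega
        have h2 : 2 ^ n = 2 * 2 ^ (n - (n - 1 - j) - 1) * 2 ^ (n - 1 - j) := by
          conv_lhs => rw [hn1]
          rw [pow_add, pow_succ]
          ring
        rw [h2, Nat.add_comm, Nat.add_mul_div_right _ _ (Nat.two_pow_pos (n - 1 - j))]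
        omega
      simp only [pvWriteLoop, hdiv, ih _ _ _ _ hn]

theorem pv_writeLoop_set (ps : List Int) :
    ∀ (t : List Char) (v n j : Nat) (p : Nat),
      pvWriteLoop (t.set p '1') ps v n j = (pvWriteLoop t ps v n j).set p '1' := by
  induction ps with
  | nil => intro t v n j p; rfl
  | cons q rest ih =>
      intro t v n j p
      simp only [pvWriteLoop]
      split
      · rw [← ih]
        congr 1
        by_cases hpq : p = q.toNat
        · subst hpq; simp [List.set_set]
        · exact List.set_comm '1' '1' hpq
      · exact ih _ _ _ _ _

-- the doubling fold, on char lists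
theorem pv_core (ps : List Int) :
    ∀ (b : List Char),
      ps.reverse.foldl (fun acc p => acc ++ acc.map (fun t => t.set p.toNat '1')) [b]
        = (List.range (2 ^ ps.length)).map (fun v => pvWriteLoop b ps v ps.length 0) := by
  induction ps with
  | nil => intro b; rfl
  | cons p rest ih =>
      intro b
      rw [List.reverse_cons, List.foldl_append, ih b]
      simp only [List.foldl_cons, List.foldl_nil, List.length_cons]
      have hsplit : 2 ^ (rest.length + 1) = 2 ^ rest.length + 2 ^ rest.length := by ring
      rw [hsplit, List.range_add, List.map_append, List.map_map, List.map_map]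
      congr 1
      · -- first half: bit at p is 0
        apply List.map_congr_left
        intro v hv
        have hv' : v < 2 ^ rest.length := by simpa using hv
        simp only [pvWriteLoop]
        have hc : v / 2 ^ (rest.length + 1 - 1 - 0) % 2 = 0 := by
          rw [Nat.div_eq_of_lt (by simpa using hv')]
        rw [if_neg (by omega)]
        exact (pv_writeLoop_shift rest b v rest.length 0).symm
      · -- second half: bit at p is 1
        apply List.map_congr_left
        intro w hw
        have hw' : w < 2 ^ rest.length := by simpa using hw
        simp only [Function.comp, pvWriteLoop]
        have hc : (2 ^ rest.length + w) / 2 ^ (rest.length + 1 - 1 - 0) % 2 = 1 := by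
          have : rest.length + 1 - 1 - 0 = rest.length := by omega
          rw [this, Nat.add_comm, Nat.add_div_right _ (Nat.two_pow_pos rest.length),
            Nat.div_eq_of_lt hw']
        rw [if_pos (by omega), pv_writeLoop_shift rest _ _ rest.length 0]
        rcases Nat.eq_zero_or_pos rest.length with h0 | hpos
        · have : rest = [] := List.eq_nil_of_length_eq_zero h0
          subst this; rfl
        · rw [pv_writeLoop_bitdrop rest _ w rest.length 0 hpos, pv_writeLoop_set]

-- the doubling fold on strings is the char-list fold under String.ofList
theorem pv_map_mk (ps : List Int) :
    ∀ (cs : List (List Char)),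
      ps.foldl (fun acc p => acc ++ acc.map (fun s => pvSet1 s p.toNat)) (cs.map String.ofList)
        = (ps.foldl (fun acc p => acc ++ acc.map (fun t => t.set p.toNat '1')) cs).map String.ofList := by
  induction ps with
  | nil => intro cs; rfl
  | cons p rest ih =>
      intro cs
      simp only [List.foldl_cons]
      rw [← ih (cs ++ cs.map (fun t => t.set p.toNat '1'))]
      congr 1
      simp [pvSet1, List.map_map, Function.comp]

-- ===== VERDICT (by name: the statement is the Claim_ definition above) =====
theorem binary_enum_spec : Claim_equal_binary_enum := by
  intro iterator key _ _
  unfold Spec_binary_enum binary_enum binary_enum_alt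
  dsimp only []
  set baseS := PySem.Str.replace (PySem.Str.join "" iterator) key "0" with hbaseS
  set c : Int → Bool := fun i => PySem.List.pyGet? iterator i == some key with hc
  -- fold the guard into a filter
  rw [show (fun (diff_list : List String) (l : Int) =>
        if PySem.List.pyGet? iterator l == some key then
          (List.range diff_list.length).foldl
            (fun acc diff => acc ++ [pvSet1 (acc.getD diff "") l.toNat]) diff_list
        else diff_list)
      = (fun diff_list l =>
        if c l then diff_list ++ diff_list.map (fun s => pvSet1 s l.toNat) else diff_list) from by
      funext diff_list l
      by_cases h : c l = true
      · simp only [hc] at h; rw [if_pos h, if_pos (by simpa [hc] using h), pv_inner]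
      · simp only [hc] at h; rw [if_neg (by simpa [hc] using h), if_neg (by simpa [hc] using h)]]
  rw [← List.foldl_filter, List.filter_reverse]
  have hmk : [baseS] = ([baseS.toList].map String.ofList) := by
    simp
  rw [hmk, pv_map_mk, pv_core]
  simp [List.map_map, Function.comp]
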